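-- pv_equiv track=rewrite | github.com/avishek376/Scaler-Problem-Solving | Advanced/01 Advanced DSA : Arrays - 1/Assignment/Q3. Continuous Sum Query/Continuous Sum Query.py | solve
-- ===== SOURCE A (Python) =====
-- def solve(A, B):
--     n = A
--     coins = [0 for __ in range(n)]
--
--     for i in range(len(B)):
--         leftIndex = B[i][0] - 1
--         rightIndex = B[i][1] - 1
--         donationByDevotee = B[i][2]
--         coins[leftIndex] += donationByDevotee
--         if (rightIndex + 1) < n:
--             coins[rightIndex + 1] -= donationByDevotee
--     summ = 0
--     pf = []
--     for i in range(n):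
--         summ += coins[i]
--         pf.append(summ)
--     return pf
-- ===== SOURCE B (Python) =====
-- def solve(A, B):
--     n = A
--     coins = [0] * n
--     for l, r, v in B:
--         coins[l - 1:] = [c + v for c in coins[l - 1:]]
--         if r < n:
--             coins[r:] = [c - v for c in coins[r:]]
--     return coins
-- ===== Notes on version B (the rewrite author's own statement) =====
-- stated objective: alternative
-- what changed: Replaces the difference-array encoding plus prefix-sum pass by applying each query directly as two suffix updates via Python slice assignment (add v from position l-1 on; if r < n, subtract v from position r on), returning the array itself with no prefix accumulation.
import Mathlib
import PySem

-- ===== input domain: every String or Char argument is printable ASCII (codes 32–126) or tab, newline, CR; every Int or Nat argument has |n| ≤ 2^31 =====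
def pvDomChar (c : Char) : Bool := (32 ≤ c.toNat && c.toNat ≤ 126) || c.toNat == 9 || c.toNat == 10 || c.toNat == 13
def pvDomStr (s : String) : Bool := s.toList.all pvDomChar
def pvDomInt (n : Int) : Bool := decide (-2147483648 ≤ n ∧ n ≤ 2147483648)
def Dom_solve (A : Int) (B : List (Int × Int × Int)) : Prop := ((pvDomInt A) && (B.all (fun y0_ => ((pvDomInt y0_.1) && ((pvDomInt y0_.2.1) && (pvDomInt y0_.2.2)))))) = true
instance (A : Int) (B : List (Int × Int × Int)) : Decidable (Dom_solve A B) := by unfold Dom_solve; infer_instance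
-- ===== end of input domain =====

-- B applies each query directly as two suffix updates on the output array (slice assignment)
-- instead of A's difference-array encoding plus prefix-sum pass (objective: alternative).

-- ===== PORT A =====
-- loop body of A's first for-loop (coins[leftIndex] += d; if rightIndex+1 < n: coins[rightIndex+1] -= d)
def stepA (n : Int) (coins : List Int) (q : Int × Int × Int) : List Int :=
  let leftIndex := q.1 - 1
  let rightIndex := q.2.1 - 1
  let donationByDevotee := q.2.2
  let coins := PySem.List.pySetD coins leftIndex
      (PySem.List.pyGetD coins leftIndex 0 + donationByDevotee)
  if rightIndex + 1 < n then
    PySem.List.pySetD coins (rightIndex + 1)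
      (PySem.List.pyGetD coins (rightIndex + 1) 0 - donationByDevotee)
  else coins

def solve (A : Int) (B : List (Int × Int × Int)) : List Int :=
  let n := A
  let coins := (PySem.List.pyRange 0 n 1).map (fun _ => (0 : Int))
  let coins := B.foldl (stepA n) coins
  ((PySem.List.pyRange 0 n 1).foldl (fun st i =>
      let summ := st.1 + PySem.List.pyGetD coins i 0
      (summ, st.2 ++ [summ])) ((0 : Int), ([] : List Int))).2

-- ===== PORT B =====
-- slice assignment coins[j:] = L (replacement spanning to the end) is ported exactly as
-- coins[:j] ++ L, with coins[:j] / coins[j:] the PySem slices.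
def stepB (n : Int) (coins : List Int) (q : Int × Int × Int) : List Int :=
  let coins := PySem.List.slice coins none (some (q.1 - 1)) ++
      (PySem.List.slice coins (some (q.1 - 1)) none).map (fun c => c + q.2.2)
  if q.2.1 < n then
    PySem.List.slice coins none (some q.2.1) ++
      (PySem.List.slice coins (some q.2.1) none).map (fun c => c - q.2.2)
  else coins

def solve_alt (A : Int) (B : List (Int × Int × Int)) : List Int :=
  let n := A
  let coins := PySem.List.pyRepeat [(0 : Int)] n
  B.foldl (stepB n) coins

-- ===== PRECONDITION & SPEC =====
-- Pre_ is exactly the inputs on which A returns (no IndexError): every query's two updated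
-- positions are valid Python indices (possibly negative) of the length-A coins array.
def Pre_solve (A : Int) (B : List (Int × Int × Int)) : Prop :=
  ∀ q ∈ B, (-((A.toNat : Int)) ≤ q.1 - 1 ∧ q.1 - 1 < (A.toNat : Int)) ∧
    (q.2.1 < A → (-((A.toNat : Int)) ≤ q.2.1 ∧ q.2.1 < (A.toNat : Int)))
instance (A : Int) (B : List (Int × Int × Int)) : Decidable (Pre_solve A B) := by
  unfold Pre_solve; infer_instance

def pvWitness_solve : Int × (List (Int × Int × Int)) := (3, [(1, 2, 5), (2, 7, -1)])

def Spec_solve (A : Int) (B : List (Int × Int × Int)) (out : List Int) : Prop := out = solve_alt A B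
instance (A : Int) (B : List (Int × Int × Int)) (out : List Int) : Decidable (Spec_solve A B out) := by unfold Spec_solve; infer_instance

-- ===== CLAIM (what is proved, stated in full; the proofs are below) =====
def Claim_equal_solve : Prop := ∀ (A : Int) (B : List (Int × Int × Int)), Dom_solve A B → Pre_solve A B → Spec_solve A B (solve A B)

-- ===== LEMMAS AND PROOFS =====

-- the Python-normalised position a possibly-negative in-range index j denotes
def posI (n j : Int) : Int := if 0 ≤ j then j else j + n

-- pointwise per-query update of A's difference array
def dd (A : Int) (i : Nat) (q : Int × Int × Int) : Int :=
  (if posI A (q.1 - 1) = (i : Int) then q.2.2 else 0) +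
    (if q.2.1 < A ∧ posI A q.2.1 = (i : Int) then -q.2.2 else 0)

-- pointwise per-query contribution of B's two suffix updates
def cB (A : Int) (i : Nat) (q : Int × Int × Int) : Int :=
  (if posI A (q.1 - 1) ≤ (i : Int) then q.2.2 else 0) +
    (if q.2.1 < A ∧ posI A q.2.1 ≤ (i : Int) then -q.2.2 else 0)

theorem pyIdx_inrange (n : Nat) (i : Int) (h0 : -(n : Int) ≤ i) (h1 : i < (n : Int)) :
    PySem.List.pyIdx? n i = some (posI n i).toNat := by
  simp only [PySem.List.pyIdx?, posI]
  split_ifs <;> simp_all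
  omega

theorem pySetD_inrange (xs : List Int) (i : Int) (v : Int)
    (h0 : -((xs.length : Int)) ≤ i) (h1 : i < (xs.length : Int)) :
    PySem.List.pySetD xs i v = xs.set (posI xs.length i).toNat v := by
  simp [PySem.List.pySetD, PySem.List.pySet?, pyIdx_inrange xs.length i h0 h1]

theorem pyGetD_inrange (xs : List Int) (i : Int) (d : Int)
    (h0 : -((xs.length : Int)) ≤ i) (h1 : i < (xs.length : Int)) :
    PySem.List.pyGetD xs i d = xs.getD (posI xs.length i).toNat d := by
  simp [PySem.List.pyGetD, PySem.List.pyGet?, pyIdx_inrange xs.length i h0 h1,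
    List.getD_eq_getElem?_getD]

theorem getD_set_ite (xs : List Int) (m : Nat) (a : Int) (i : Nat) :
    (xs.set m a).getD i 0 = if m = i ∧ m < xs.length then a else xs.getD i 0 := by
  rw [List.getD_eq_getElem?_getD, List.getElem?_set]
  split_ifs <;> simp_all [List.getD_eq_getElem?_getD]
  omega

-- ---- A side ----
theorem length_stepA (A : Int) (coins : List Int) (q : Int × Int × Int) :
    (stepA A coins q).length = coins.length := by
  simp only [stepA]
  split_ifs
  all_goals simp [PySem.List.length_pySetD]

theorem stepA_getD (A : Int) (coins : List Int) (q : Int × Int × Int)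
    (hq1 : -((A.toNat : Int)) ≤ q.1 - 1 ∧ q.1 - 1 < (A.toNat : Int))
    (hq2 : q.2.1 < A → (-((A.toNat : Int)) ≤ q.2.1 ∧ q.2.1 < (A.toNat : Int)))
    (hlen : coins.length = A.toNat) (i : Nat) (hi : i < coins.length) :
    (stepA A coins q).getD i 0 = coins.getD i 0 + dd A i q := by
  obtain ⟨l, r, v⟩ := q
  simp only at hq1 hq2
  have hA1 : 1 ≤ A := by omega
  have hAlen : ((coins.length : Int)) = A := by omega
  simp only [stepA, dd]
  have e : r - 1 + 1 = r := by ring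
  rw [e]
  rw [pySetD_inrange coins _ _ (by omega) (by omega),
      pyGetD_inrange coins _ _ (by omega) (by omega), hAlen]
  set L := posI A (l - 1) with hL
  have hLb : 0 ≤ L ∧ L < A := by rw [hL]; simp only [posI]; split_ifs <;> omega
  by_cases hr : r < A
  · obtain ⟨hr0, hr1⟩ := hq2 hr
    rw [if_pos hr,
        pySetD_inrange _ _ _ (by simp only [List.length_set]; omega)
          (by simp only [List.length_set]; omega),
        pyGetD_inrange _ _ _ (by simp only [List.length_set]; omega)
          (by simp only [List.length_set]; omega)]
    simp only [List.length_set, hAlen]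
    set R := posI A r with hR
    have hRb : 0 ≤ R ∧ R < A := by rw [hR]; simp only [posI]; split_ifs <;> omega
    rw [getD_set_ite, getD_set_ite, getD_set_ite]
    simp only [hr, true_and]
    have hLN : L.toNat = i ↔ L = (i : Int) := by omega
    have hRN : R.toNat = i ↔ R = (i : Int) := by omega
    have hLR : L.toNat = R.toNat ↔ L = R := by omega
    split_ifs <;> simp_all
    omega
  · rw [if_neg hr, getD_set_ite]
    simp only [hr, false_and, if_false, add_zero]
    have hLN : L.toNat = i ↔ L = (i : Int) := by omega
    split_ifs <;> simp_all

theorem foldA_getD (A : Int) (qs : List (Int × Int × Int)) (coins : List Int)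
    (hq : ∀ q ∈ qs, (-((A.toNat : Int)) ≤ q.1 - 1 ∧ q.1 - 1 < (A.toNat : Int)) ∧
      (q.2.1 < A → (-((A.toNat : Int)) ≤ q.2.1 ∧ q.2.1 < (A.toNat : Int))))
    (hlen : coins.length = A.toNat)
    (i : Nat) (hi : i < coins.length) :
    (qs.foldl (stepA A) coins).getD i 0 = coins.getD i 0 + (qs.map (dd A i)).sum := by
  induction qs generalizing coins with
  | nil => simp
  | cons q qs ih =>
    obtain ⟨hq1, hq2⟩ := hq q (by simp)
    have hst := stepA_getD A coins q hq1 hq2 hlen i hi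
    have hl := length_stepA A coins q
    rw [List.foldl_cons, ih (stepA A coins q) (fun p hp => hq p (by simp [hp]))
      (by omega) (by omega), hst]
    simp [List.map_cons, List.sum_cons]; ring

theorem sum_delta (c v : Int) (n : Nat) :
    ((List.range n).map (fun (t : Nat) => if c = (t : Int) then v else 0)).sum
      = if 0 ≤ c ∧ c < (n : Int) then v else 0 := by
  induction n with
  | zero =>
    simp only [List.range_zero, List.map_nil, List.sum_nil]
    rw [if_neg (by push_cast; omega)]
  | succ n ih =>
    rw [List.range_succ, List.map_append, List.sum_append, ih]
    simp only [List.map_cons, List.map_nil, List.sum_cons, List.sum_nil]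
    by_cases h : c = (n : Int) <;> split_ifs <;> push_cast at * <;> omega

theorem sum_swap (f : Nat → (Int × Int × Int) → Int) (qs : List (Int × Int × Int)) (m : Nat) :
    ((List.range m).map (fun (t : Nat) => (qs.map (f t)).sum)).sum
      = (qs.map (fun q => ((List.range m).map (fun (t : Nat) => f t q)).sum)).sum := by
  induction qs with
  | nil => simp
  | cons q qs ih =>
    simp only [List.map_cons, List.sum_cons, ← ih, ← PySem.List.sum_map_add_int]

-- prefix sums of A's per-query difference-array update equal B's per-query suffix contribution
theorem sum_dd_eq_cB (A : Int) (q : Int × Int × Int)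
    (hq1 : -((A.toNat : Int)) ≤ q.1 - 1 ∧ q.1 - 1 < (A.toNat : Int))
    (hq2 : q.2.1 < A → (-((A.toNat : Int)) ≤ q.2.1 ∧ q.2.1 < (A.toNat : Int)))
    (i : Nat) :
    ((List.range (i + 1)).map (fun (t : Nat) => dd A t q)).sum = cB A i q := by
  obtain ⟨l, r, v⟩ := q
  simp only at hq1 hq2
  simp only [dd, cB]
  rw [PySem.List.sum_map_add_int, sum_delta]
  have hli : 0 ≤ posI A (l - 1) ∧ posI A (l - 1) < (A.toNat : Int) := by
    simp only [posI]; split_ifs <;> omega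
  by_cases hrA : r < A
  · obtain ⟨hr0, hr1⟩ := hq2 hrA
    have hri : 0 ≤ posI A r ∧ posI A r < (A.toNat : Int) := by
      simp only [posI]; split_ifs <;> omega
    simp only [hrA, true_and]
    rw [sum_delta]
    split_ifs <;> push_cast at * <;> omega
  · have hfalse : ∀ (t : Nat), (¬ (r < A ∧ posI A r = (t : Int))) := by
      intro t; simp [hrA]
    simp only [if_neg (hfalse _), if_neg (fun h : r < A ∧ _ => hrA h.1)]
    simp only [List.map_const']
    rw [List.sum_replicate]
    simp only [List.length_range, smul_zero, add_zero]
    split_ifs <;> push_cast at * <;> omega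

theorem prefix_fold (g : Int → Int) (n : Nat) (s0 : Int) (acc : List Int) :
    (((List.range n).map (fun (k : Nat) => (k : Int))).foldl
        (fun st i => (st.1 + g i, st.2 ++ [st.1 + g i])) (s0, acc))
      = (s0 + ((List.range n).map (fun (k : Nat) => g (k : Int))).sum,
         acc ++ (List.range n).map (fun (k : Nat) =>
           s0 + ((List.range (k + 1)).map (fun (t : Nat) => g (t : Int))).sum)) := by
  induction n with
  | zero => simp
  | succ n ih =>
    rw [List.range_succ, List.map_append, List.foldl_append, ih]
    simp only [List.map_cons, List.map_nil, List.foldl_cons, List.foldl_nil,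
      List.map_append, List.sum_append, List.sum_cons, List.sum_nil]
    rw [Prod.mk.injEq]
    constructor
    · simp; ring
    · rw [List.append_assoc]
      congr 2
      simp [List.range_succ]
      ring

-- ---- B side ----
-- one suffix update coins[:j] ++ (coins[j:]).map (+w), for an in-range possibly-negative j
theorem suffix_update_getD (coins : List Int) (j w : Int)
    (h0 : -((coins.length : Int)) ≤ j) (h1 : j < (coins.length : Int)) (i : Nat)
    (hi : i < coins.length) :
    (PySem.List.slice coins none (some j) ++
        (PySem.List.slice coins (some j) none).map (fun c => c + w)).getD i 0
      = coins.getD i 0 + (if posI coins.length j ≤ (i : Int) then w else 0) := by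
  have hcl : PySem.List.clampIdx coins.length j = (posI coins.length j).toNat := by
    simp only [PySem.List.clampIdx, posI]
    split_ifs <;> omega
  rw [PySem.List.slice_some_none, hcl]
  have hto : PySem.List.slice coins none (some j) = coins.take (posI coins.length j).toNat := by
    by_cases hj : 0 ≤ j
    · rw [PySem.List.slice_to coins hj]
      simp only [posI, if_pos hj]
    · have hj' : j = -(((-j).toNat : Int)) := by omega
      rw [hj', PySem.List.slice_to_neg_natCast coins (-j).toNat (by omega)]
      congr 1
      simp only [posI]
      omega
  rw [hto]
  set p := (posI coins.length j).toNat with hp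
  have hpb : p ≤ coins.length := by
    simp only [hp, posI]; split_ifs <;> omega
  by_cases hip : i < p
  · rw [if_neg (by simp only [posI] at hp ⊢; omega), add_zero,
      List.getD_eq_getElem?_getD, List.getElem?_append_left (by simp; omega),
      List.getElem?_take, if_pos hip, List.getD_eq_getElem?_getD]
  · rw [if_pos (by simp only [posI] at hp ⊢; omega),
      List.getD_eq_getElem?_getD]
    have hlt : (coins.take p).length = p := by simp; omega
    rw [List.getElem?_append_right (by omega), hlt, List.getElem?_map,
      List.getElem?_drop]
    have : p + (i - p) = i := by omega
    rw [this, List.getElem?_eq_getElem hi]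
    simp [List.getD_eq_getElem?_getD, List.getElem?_eq_getElem hi]

theorem length_suffix_update (coins : List Int) (j : Int) (f : Int → Int) :
    (PySem.List.slice coins none (some j) ++
        (PySem.List.slice coins (some j) none).map f).length
      = coins.length := by
  rw [PySem.List.slice_some_none]
  simp only [List.length_append, List.length_map, List.length_drop]
  by_cases hj : 0 ≤ j
  · rw [PySem.List.slice_to coins hj]
    have hj2 : j = ((j.toNat : Nat) : Int) := by omega
    rw [hj2, PySem.List.clampIdx_natCast]
    simp only [List.length_take]
    omega
  · have hj' : j = -(((-j).toNat : Int)) := by omega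
    have hk : 0 < (-j).toNat := by omega
    rw [hj', PySem.List.slice_to_neg_natCast coins _ hk,
      PySem.List.clampIdx_neg_natCast coins.length (-j).toNat hk]
    simp only [List.length_take]
    omega

theorem length_stepB (A : Int) (coins : List Int) (q : Int × Int × Int) :
    (stepB A coins q).length = coins.length := by
  simp only [stepB]
  split_ifs
  all_goals rw [length_suffix_update]
  rw [length_suffix_update]


theorem stepB_getD (A : Int) (coins : List Int) (q : Int × Int × Int)
    (hq1 : -((A.toNat : Int)) ≤ q.1 - 1 ∧ q.1 - 1 < (A.toNat : Int))
    (hq2 : q.2.1 < A → (-((A.toNat : Int)) ≤ q.2.1 ∧ q.2.1 < (A.toNat : Int)))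
    (hlen : coins.length = A.toNat) (i : Nat) (hi : i < coins.length) :
    (stepB A coins q).getD i 0 = coins.getD i 0 + cB A i q := by
  obtain ⟨l, r, v⟩ := q
  simp only at hq1 hq2
  have hA1 : 1 ≤ A := by omega
  have hposl : posI coins.length (l - 1) = posI A (l - 1) := by
    simp only [posI]; split_ifs <;> omega
  simp only [stepB, cB]
  by_cases hr : r < A
  · obtain ⟨hr0, hr1⟩ := hq2 hr
    rw [if_pos hr]
    have hlen1 := length_suffix_update coins (l - 1) (fun c => c + v)
    have hposr : posI (PySem.List.slice coins none (some (l - 1)) ++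
        (PySem.List.slice coins (some (l - 1)) none).map (fun c => c + v)).length r
        = posI A r := by
      rw [hlen1]; simp only [posI]; split_ifs <;> omega
    have hstep2 := suffix_update_getD (PySem.List.slice coins none (some (l - 1)) ++
        (PySem.List.slice coins (some (l - 1)) none).map (fun c => c + v)) r (-v)
        (by rw [hlen1]; omega) (by rw [hlen1]; omega) i (by rw [hlen1]; omega)
    have e : ∀ c : Int, c + (-v) = c - v := by intro c; ring
    simp only [e] at hstep2
    rw [hstep2, hposr,
      suffix_update_getD coins (l - 1) v (by omega) (by omega) i hi, hposl]
    simp only [hr, true_and]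
    ring
  · rw [if_neg hr,
      suffix_update_getD coins (l - 1) v (by omega) (by omega) i hi, hposl]
    simp only [hr, false_and, if_false, add_zero]

theorem foldB_getD (A : Int) (qs : List (Int × Int × Int)) (coins : List Int)
    (hq : ∀ q ∈ qs, (-((A.toNat : Int)) ≤ q.1 - 1 ∧ q.1 - 1 < (A.toNat : Int)) ∧
      (q.2.1 < A → (-((A.toNat : Int)) ≤ q.2.1 ∧ q.2.1 < (A.toNat : Int))))
    (hlen : coins.length = A.toNat)
    (i : Nat) (hi : i < coins.length) :
    (qs.foldl (stepB A) coins).getD i 0 = coins.getD i 0 + (qs.map (cB A i)).sum := by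
  induction qs generalizing coins with
  | nil => simp
  | cons q qs ih =>
    obtain ⟨hq1, hq2⟩ := hq q (by simp)
    have hst := stepB_getD A coins q hq1 hq2 hlen i hi
    have hl := length_stepB A coins q
    rw [List.foldl_cons, ih (stepB A coins q) (fun p hp => hq p (by simp [hp]))
      (by omega) (by omega), hst]
    simp [List.map_cons, List.sum_cons]; ring

theorem length_foldB (A : Int) (qs : List (Int × Int × Int)) (coins : List Int) :
    (qs.foldl (stepB A) coins).length = coins.length := by
  induction qs generalizing coins with
  | nil => rfl
  | cons q qs ih => rw [List.foldl_cons, ih, length_stepB]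

-- ===== VERDICT (by name: the statement is the Claim_ definition above) =====
theorem solve_spec : Claim_equal_solve := by
  intro A B _ hpre
  unfold Spec_solve solve solve_alt
  have e1 : PySem.List.pyRange 0 A 1 = (List.range A.toNat).map (fun (k : Nat) => (k : Int)) := by
    simp [PySem.List.pyRange_one]
  simp only [PySem.List.pyRepeat_singleton, e1]
  rw [prefix_fold]
  simp only [List.nil_append]
  have hlenB := length_foldB A B (List.replicate A.toNat 0)
  rw [List.length_replicate] at hlenB
  apply List.ext_getElem
  · simp [hlenB]
  · intro k hk1 hk2
    simp only [List.length_map, List.length_range] at hk1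
    rw [List.getElem_map, List.getElem_range,
      ← List.getD_eq_getElem _ 0 hk2,
      foldB_getD A B _ hpre (by simp) k (by simp; omega)]
    have hgetA : ∀ t : Nat, t < A.toNat →
        (List.foldl (stepA A)
            (List.map (fun _ => (0 : Int)) ((List.range A.toNat).map (fun (k : Nat) => (k : Int)))) B).getD t 0
          = (B.map (dd A t)).sum := by
      intro t ht
      rw [foldA_getD A B _ hpre (by simp) t (by simpa using ht)]
      simp [List.getD_eq_getElem?_getD, ht]
    simp only [PySem.List.pyGetD_natCast]
    rw [zero_add,
      List.map_congr_left (l := List.range (k + 1))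
        (fun t ht => hgetA t (by rw [List.mem_range] at ht; omega)),
      sum_swap (dd A) B (k + 1)]
    have hrep : (List.replicate A.toNat (0 : Int)).getD k 0 = 0 := by
      rw [List.getD_eq_getElem _ 0 (by simpa using hk1)]
      simp
    rw [hrep, zero_add]
    exact List.map_congr_left (fun q hq =>
      sum_dd_eq_cB A q ((hpre q hq).1) ((hpre q hq).2) k) ▸ rfl
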